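-- pv_equiv track=rewrite | github.com/iamawumpas/Metlink-Explorer | custom_components/metlink_explorer/api.py | _lane_step_for_route
-- ===== SOURCE A (Python) =====
-- def _lane_step_for_route(route_short_name: str, overlapping_routes: set[str]) -> int:
--     """Return lane step where negative is west and positive is east."""
--     name = route_short_name.upper()
--     routes = {r.upper() for r in overlapping_routes}
--
--     steps: dict[str, int] = {}
--     mel_present = "MEL" in routes
--     hvl_present = "HVL" in routes
--     kpl_present = "KPL" in routes
--     jvl_present = "JVL" in routes
--     wrl_present = "WRL" in routes
--
--     if mel_present:
--         steps["MEL"] = 0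
--         if kpl_present:
--             steps["KPL"] = -1
--             if jvl_present:
--                 steps["JVL"] = -2
--             if hvl_present:
--                 steps["HVL"] = 1
--                 if wrl_present:
--                     steps["WRL"] = 2
--             elif wrl_present:
--                 steps["WRL"] = 1
--         else:
--             # Special case: if KPL is missing, WRL moves west of MEL.
--             if wrl_present:
--                 steps["WRL"] = -1
--             if jvl_present:
--                 steps["JVL"] = -2 if wrl_present else -1
--             if hvl_present:
--                 steps["HVL"] = 1
--     else:
--         # Special case: if MEL is missing, HVL is centered when present.
--         if hvl_present:
--             steps["HVL"] = 0
--         if wrl_present: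
--             steps["WRL"] = 1 if hvl_present else 0
--         if kpl_present:
--             steps["KPL"] = -1 if hvl_present else 0
--         if jvl_present:
--             if kpl_present:
--                 steps["JVL"] = steps["KPL"] - 1
--             elif hvl_present:
--                 steps["JVL"] = -1
--             else:
--                 steps["JVL"] = 0
--
--     return steps.get(name, 0)
-- ===== SOURCE B (Python) =====
-- def _lane_step_for_route(route_short_name: str, overlapping_routes: set[str]) -> int:
--     """Return lane step where negative is west and positive is east."""
--     name = route_short_name.upper()
--     up = [r.upper() for r in overlapping_routes]
--     mel = "MEL" in up
--     hvl = "HVL" in up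
--     kpl = "KPL" in up
--     jvl = "JVL" in up
--     wrl = "WRL" in up
--     if name == "MEL":
--         return 0
--     if name == "KPL" and kpl:
--         return -1 if (mel or hvl) else 0
--     if name == "HVL" and hvl:
--         return 1 if mel else 0
--     if name == "WRL" and wrl:
--         if mel:
--             return (2 if hvl else 1) if kpl else -1
--         return 1 if hvl else 0
--     if name == "JVL" and jvl:
--         if mel:
--             return -2 if kpl else (-2 if wrl else -1)
--         if kpl:
--             return -2 if hvl else -1
--         if hvl:
--             return -1
--         return 0
--     return 0
-- ===== Notes on version B (the rewrite author's own statement) =====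
-- stated objective: simpler
-- what changed: B drops A's construction of the whole steps dict followed by steps.get(name, 0): it computes the five presence flags once and branches directly on the uppercased name, returning that single route's offset as an inlined conditional expression.
import Mathlib
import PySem

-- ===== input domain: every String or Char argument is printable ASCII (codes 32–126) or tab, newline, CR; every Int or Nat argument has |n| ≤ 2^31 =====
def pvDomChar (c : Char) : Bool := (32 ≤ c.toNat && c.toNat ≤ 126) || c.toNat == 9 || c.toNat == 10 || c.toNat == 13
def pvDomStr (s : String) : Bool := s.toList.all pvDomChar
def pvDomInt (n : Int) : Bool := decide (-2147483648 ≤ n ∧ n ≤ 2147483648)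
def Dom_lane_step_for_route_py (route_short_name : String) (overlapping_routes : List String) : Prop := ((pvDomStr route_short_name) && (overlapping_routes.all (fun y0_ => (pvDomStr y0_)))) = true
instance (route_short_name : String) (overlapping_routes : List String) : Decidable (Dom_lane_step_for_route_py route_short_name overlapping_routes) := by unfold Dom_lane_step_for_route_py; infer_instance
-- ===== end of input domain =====

-- B replaces A's construction of the whole `steps` dict (then `steps.get(name, 0)`) by a direct
-- branch on the requested name with each offset inlined (objective: simpler).

-- ===== PORT A =====
def lane_step_for_route_py (route_short_name : String) (overlapping_routes : List String) : Int :=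
  let name := PySem.Str.upper route_short_name
  let routes : PySem.Set String := PySem.Set.ofList (overlapping_routes.map PySem.Str.upper)
  let steps : PySem.Dict String Int := PySem.Dict.empty
  let mel_present := PySem.Set.contains routes "MEL"
  let hvl_present := PySem.Set.contains routes "HVL"
  let kpl_present := PySem.Set.contains routes "KPL"
  let jvl_present := PySem.Set.contains routes "JVL"
  let wrl_present := PySem.Set.contains routes "WRL"
  let steps :=
    if mel_present then
      let steps := steps.insert "MEL" 0
      if kpl_present then
        let steps := steps.insert "KPL" (-1)
        let steps := if jvl_present then steps.insert "JVL" (-2) else steps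
        if hvl_present then
          let steps := steps.insert "HVL" 1
          if wrl_present then steps.insert "WRL" 2 else steps
        else
          if wrl_present then steps.insert "WRL" 1 else steps
      else
        let steps := if wrl_present then steps.insert "WRL" (-1) else steps
        let steps := if jvl_present then steps.insert "JVL" (if wrl_present then -2 else -1) else steps
        if hvl_present then steps.insert "HVL" 1 else steps
    else
      let steps := if hvl_present then steps.insert "HVL" 0 else steps
      let steps := if wrl_present then steps.insert "WRL" (if hvl_present then 1 else 0) else steps
      let steps := if kpl_present then steps.insert "KPL" (if hvl_present then -1 else 0) else steps
      if jvl_present then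
        if kpl_present then
          -- steps["KPL"] never raises here: KPL was just inserted (kpl_present holds)
          steps.insert "JVL" (steps.getD "KPL" 0 - 1)
        else if hvl_present then steps.insert "JVL" (-1)
        else steps.insert "JVL" 0
      else steps
  steps.getD name 0

-- ===== PORT B =====
def lane_step_for_route_py_alt (route_short_name : String) (overlapping_routes : List String) : Int :=
  let name := PySem.Str.upper route_short_name
  let up := overlapping_routes.map PySem.Str.upper
  let mel := up.contains "MEL"
  let hvl := up.contains "HVL"
  let kpl := up.contains "KPL"
  let jvl := up.contains "JVL"
  let wrl := up.contains "WRL"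
  if name == "MEL" then 0
  else if name == "KPL" && kpl then (if mel || hvl then -1 else 0)
  else if name == "HVL" && hvl then (if mel then 1 else 0)
  else if name == "WRL" && wrl then
    (if mel then (if kpl then (if hvl then 2 else 1) else -1) else (if hvl then 1 else 0))
  else if name == "JVL" && jvl then
    (if mel then (if kpl then -2 else (if wrl then -2 else -1))
     else if kpl then (if hvl then -2 else -1)
     else if hvl then -1 else 0)
  else 0

-- ===== PRECONDITION & SPEC =====
def Spec_lane_step_for_route_py (route_short_name : String) (overlapping_routes : List String) (out : Int) : Prop := out = lane_step_for_route_py_alt route_short_name overlapping_routes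
instance (route_short_name : String) (overlapping_routes : List String) (out : Int) : Decidable (Spec_lane_step_for_route_py route_short_name overlapping_routes out) := by unfold Spec_lane_step_for_route_py; infer_instance

-- ===== CLAIM (what is proved, stated in full; the proofs are below) =====
def Claim_equal_lane_step_for_route_py : Prop := ∀ (route_short_name : String) (overlapping_routes : List String), Dom_lane_step_for_route_py route_short_name overlapping_routes → Spec_lane_step_for_route_py route_short_name overlapping_routes (lane_step_for_route_py route_short_name overlapping_routes)

-- ===== LEMMAS AND PROOFS =====

theorem pv_getD_empty (k : String) (d : Int) :
    (PySem.Dict.empty : PySem.Dict String Int).getD k d = d := rfl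

theorem set_contains_eq_contains (xs : List String) (s : String) :
    PySem.Set.contains (PySem.Set.ofList xs) s = xs.contains s := by
  simp [pysem, PySem.Set.contains]

-- ===== VERDICT (by name: the statement is the Claim_ definition above) =====
set_option maxHeartbeats 2000000 in
theorem lane_step_for_route_py_spec : Claim_equal_lane_step_for_route_py := by
  intro rsn ov _
  unfold Spec_lane_step_for_route_py lane_step_for_route_py lane_step_for_route_py_alt
  simp only [set_contains_eq_contains]
  set name := PySem.Str.upper rsn with hname
  set up := ov.map PySem.Str.upper with hup
  cases hmel : up.contains "MEL" <;> cases hhvl : up.contains "HVL" <;>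
    cases hkpl : up.contains "KPL" <;> cases hjvl : up.contains "JVL" <;>
    cases hwrl : up.contains "WRL" <;>
  · simp only [Bool.true_and, Bool.false_and, Bool.and_true, Bool.and_false,
      Bool.true_or, Bool.false_or, Bool.or_true, Bool.or_false, ite_true, ite_false,
      PySem.Dict.getD_insert]
    split_ifs <;> simp_all [pv_getD_empty, PySem.Dict.getD_insert]
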